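-- pv_equiv track=rewrite | github.com/Ajay-Zad/GeeksForGeeks-Coding-Files | Maximum number of zeroes.py | MaxZero
-- ===== SOURCE A (Python) =====
-- def MaxZero(arr, n):
--     # Your code goes here
--     cnt = 0
--     l = []
--     for i in arr:
--         ii = str(i)
--         iii = ii.count('0')
--         if iii >= cnt:
--             cnt = iii
--             l.append(i)
--
--     if cnt == 0:
--         return -1
--     else:
--         ll = []
--         for i in l:
--             if str(i).count('0') == cnt:
--                 ll.append(i)
--         return(max(ll))
-- ===== SOURCE B (Python) =====
-- def MaxZero(arr, n):
--     # Idiomatic single reduction: the answer is the max of arr under the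
--     # lexicographic key (zero-digit count, value); -1 if that max has no zeros.
--     if not arr:
--         return -1
--     m = max(arr, key=lambda i: (str(i).count('0'), i))
--     return m if str(m).count('0') > 0 else -1
-- ===== Notes on version B (the rewrite author's own statement) =====
-- stated objective: simpler
-- what changed: A's two passes (a growing candidate list under a running max count, then a filter-and-max pass) are replaced by a single built-in max over the lexicographic key (zero-digit count, value), with -1 when the list is empty or the winner has no zero digit.
import Mathlib
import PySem

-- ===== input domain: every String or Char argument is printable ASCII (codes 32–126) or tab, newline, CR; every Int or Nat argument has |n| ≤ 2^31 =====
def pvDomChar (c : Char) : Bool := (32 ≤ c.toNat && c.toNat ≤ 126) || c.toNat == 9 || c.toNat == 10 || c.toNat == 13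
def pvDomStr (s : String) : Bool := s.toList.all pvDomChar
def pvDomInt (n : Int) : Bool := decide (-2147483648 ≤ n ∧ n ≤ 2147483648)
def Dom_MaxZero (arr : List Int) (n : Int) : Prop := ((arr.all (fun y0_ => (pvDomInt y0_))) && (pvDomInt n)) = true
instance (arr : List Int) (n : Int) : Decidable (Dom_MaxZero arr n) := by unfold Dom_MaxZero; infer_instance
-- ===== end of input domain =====

-- B replaces A's candidate-list loop plus filter-and-max pass by one library max
-- over the lexicographic key (zero-digit count, value); objective: simpler.

-- str(i).count('0') — shared subexpression of both sources
def zcount (i : Int) : Nat := PySem.Chars.count (PySem.Int.toChars i) ['0']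

-- ===== PORT A =====
-- loop body of A's first pass: state (cnt, l)
def stepA (s : Int × List Int) (i : Int) : Int × List Int :=
  let iii : Int := (zcount i : Int)
  if iii ≥ s.1 then (iii, s.2 ++ [i]) else s

def MaxZero (arr : List Int) (n : Int) : Int :=
  let s := arr.foldl stepA (0, [])
  if s.1 = 0 then -1
  else
    let ll := s.2.filter (fun i => ((zcount i : Int)) == s.1)
    -- max(ll): ll is nonempty whenever cnt ≠ 0, so the none branch is unreachable
    match PySem.List.max? ll (fun x => x) with
    | some v => v
    | none => -1

-- ===== PORT B =====
def MaxZero_alt (arr : List Int) (n : Int) : Int :=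
  match arr with
  | [] => -1
  | _ =>
    match PySem.List.max2? arr (fun i => zcount i) (fun i => i) with
    | some m => if 0 < zcount m then m else -1
    | none => -1

-- ===== PRECONDITION & SPEC =====
def Spec_MaxZero (arr : List Int) (n : Int) (out : Int) : Prop := out = MaxZero_alt arr n
instance (arr : List Int) (n : Int) (out : Int) : Decidable (Spec_MaxZero arr n out) := by unfold Spec_MaxZero; infer_instance

-- ===== CLAIM (what is proved, stated in full; the proofs are below) =====
def Claim_equal_MaxZero : Prop := ∀ (arr : List Int) (n : Int), Dom_MaxZero arr n → Spec_MaxZero arr n (MaxZero arr n)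

-- ===== LEMMAS AND PROOFS =====

-- the step of max2? with key (zcount, id)
def stepB (m : Option Int) (i : Int) : Option Int :=
  match m with
  | none => some i
  | some v =>
    if (decide (zcount v < zcount i) || !decide (zcount i < zcount v) && decide (v < i)) = true
    then some i else some v

lemma max2?_eq_foldl (arr : List Int) :
    PySem.List.max2? arr (fun i => zcount i) (fun i => i) = arr.foldl stepB none := by
  unfold PySem.List.max2?
  congr 1
  funext m i
  cases m <;> rfl

-- joint invariant of A's first pass and B's max2? fold
def JInv (c : Int) (l : List Int) (m : Option Int) : Prop :=
  0 ≤ c ∧ (∀ x ∈ l, ((zcount x : Int)) ≤ c) ∧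
  match m with
  | none => c = 0 ∧ l = []
  | some v => ((zcount v : Int)) ≤ c ∧
      (0 < c → ((zcount v : Int)) = c ∧
        PySem.List.max? (l.filter (fun x => ((zcount x : Int)) == c)) (fun x => x) = some v)

lemma max?_append_singleton (F : List Int) (v i : Int)
    (h : PySem.List.max? F (fun x => x) = some v) :
    PySem.List.max? (F ++ [i]) (fun x => x) = some (if v < i then i else v) := by
  simp [PySem.List.max?, List.foldl_append] at h ⊢
  rw [h]
  by_cases hvi : v < i <;> simp [hvi]

lemma inv_step (c : Int) (l : List Int) (m : Option Int) (i : Int)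
    (h : JInv c l m) : JInv (stepA (c, l) i).1 (stepA (c, l) i).2 (stepB m i) := by
  obtain ⟨hc, hl, hm⟩ := h
  simp only [stepA, stepB]
  match m with
  | none =>
    obtain ⟨hc0, hl0⟩ := hm
    subst hc0; subst hl0
    have : ((zcount i : Int)) ≥ 0 := by positivity
    simp only [this, if_pos]
    refine ⟨by positivity, ?_, le_refl _, ?_⟩
    · intro x hx; simp at hx; subst hx; rfl
    · intro hpos
      refine ⟨rfl, ?_⟩
      simp [PySem.List.max?]
  | some v =>
    obtain ⟨hvle, hvpos⟩ := hm
    by_cases hge : ((zcount i : Int)) ≥ c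
    · -- A updates: cnt := zcount i, append i
      simp only [hge, if_pos]
      rcases lt_or_eq_of_le hge with hgt | heq
      · -- strictly larger count: B picks i; filter at new cnt = [i]
        have hvi : zcount v < zcount i := by
          have : ((zcount v : Int)) < ((zcount i : Int)) := lt_of_le_of_lt hvle hgt
          exact_mod_cast this
        have hb : (decide (zcount v < zcount i) || !decide (zcount i < zcount v) && decide (v < i)) = true := by
          simp [hvi]
        simp only [hb, if_pos]
        refine ⟨by positivity, ?_, le_refl _, ?_⟩
        · intro x hx
          rcases List.mem_append.mp hx with hx | hx
          · exact le_of_lt (lt_of_le_of_lt (hl x hx) hgt)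
          · simp at hx; subst hx; rfl
        · intro _
          refine ⟨rfl, ?_⟩
          have hfilt : l.filter (fun x => ((zcount x : Int)) == ((zcount i : Int))) = [] := by
            rw [List.filter_eq_nil_iff]
            intro x hx
            have := lt_of_le_of_lt (hl x hx) hgt
            simp [ne_of_lt this]
          rw [List.filter_append, hfilt]
          simp [PySem.List.max?]
      · -- equal count: new cnt = zcount i = c
        subst heq
        have hziv : zcount v = zcount i := by
          by_cases hcpos : (0:Int) < ((zcount i : Int))
          · have hzv := (hvpos hcpos).1
            exact_mod_cast hzv
          · have h1 : (0:Int) ≤ ((zcount i : Int)) := by positivity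
            have h2 : (0:Int) ≤ ((zcount v : Int)) := by positivity
            have : ((zcount v : Int)) = ((zcount i : Int)) := by omega
            exact_mod_cast this
        have hstep : (if (decide (zcount v < zcount i) || !decide (zcount i < zcount v) && decide (v < i)) = true
            then some i else some v) = some (if v < i then i else v) := by
          by_cases hvi : v < i <;> simp [hziv, hvi]
        rw [hstep]
        have hzw : zcount (if v < i then i else v) = zcount i := by
          by_cases hvi : v < i <;> simp [hvi, hziv]
        refine ⟨by positivity, ?_, ?_, ?_⟩
        · intro x hx
          rcases List.mem_append.mp hx with hx | hx
          · exact hl x hx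
          · simp at hx; subst hx; rfl
        · rw [hzw]
        · intro hpos
          obtain ⟨hzv, hmax⟩ := hvpos hpos
          refine ⟨by rw [hzw], ?_⟩
          have hfilt : (l ++ [i]).filter (fun x => ((zcount x : Int)) == ((zcount i : Int))) =
              l.filter (fun x => ((zcount x : Int)) == ((zcount i : Int))) ++ [i] := by
            simp [List.filter_append]
          rw [hfilt, max?_append_singleton _ v i hmax]
    · -- zcount i < c: A keeps state; B must keep v
      simp only [hge, if_neg, not_false_iff]
      have hcpos : 0 < c := by
        by_contra h0
        have : c = 0 := le_antisymm (not_lt.mp h0) hc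
        subst this
        exact hge (by positivity)
      obtain ⟨hzv, hmax⟩ := hvpos hcpos
      have hiv : zcount i < zcount v := by
        have : ((zcount i : Int)) < ((zcount v : Int)) := by rw [hzv]; exact not_le.mp hge
        exact_mod_cast this
      have hb : (decide (zcount v < zcount i) || !decide (zcount i < zcount v) && decide (v < i)) = false := by
        simp [hiv, asymm hiv]
      rw [hb]
      simp only [Bool.false_eq_true, if_neg, not_false_iff]
      exact ⟨hc, hl, hvle, fun _ => ⟨hzv, hmax⟩⟩

lemma inv_fold (rest : List Int) : ∀ (c : Int) (l : List Int) (m : Option Int),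
    JInv c l m →
    JInv (rest.foldl stepA (c, l)).1 (rest.foldl stepA (c, l)).2 (rest.foldl stepB m) := by
  induction rest with
  | nil => intro c l m h; exact h
  | cons i rest ih =>
    intro c l m h
    have h' := inv_step c l m i h
    simpa using ih (stepA (c, l) i).1 (stepA (c, l) i).2 (stepB m i) h'

-- ===== VERDICT (by name: the statement is the Claim_ definition above) =====
theorem MaxZero_spec : Claim_equal_MaxZero := by
  intro arr n _
  unfold Spec_MaxZero MaxZero MaxZero_alt
  rw [max2?_eq_foldl]
  have hinv : JInv (arr.foldl stepA (0, [])).1 (arr.foldl stepA (0, [])).2 (arr.foldl stepB none) := by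
    have := inv_fold arr 0 [] none ⟨le_refl 0, by simp, rfl, rfl⟩
    simpa using this
  obtain ⟨hc, hl, hm⟩ := hinv
  match arr with
  | [] => simp
  | a :: t =>
    match hmm : (a :: t).foldl stepB none with
    | none =>
      rw [hmm] at hm
      exfalso
      have : ∀ (rest : List Int) (m : Option Int) (i : Int),
          rest.foldl stepB (stepB m i) ≠ none := by
        intro rest
        induction rest with
        | nil =>
          intro m i
          cases m with
          | none => simp [stepB]
          | some v => simp only [stepB, List.foldl_nil]; split <;> simp
        | cons j rest ih => intro m i; simpa [List.foldl_cons] using ih (stepB m i) j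
      exact this t none a (by simpa [List.foldl_cons] using hmm)
    | some v =>
      rw [hmm] at hm
      obtain ⟨hvle, hvpos⟩ := hm
      by_cases hc0 : ((a :: t).foldl stepA (0, [])).1 = 0
      · have hz0 : zcount v = 0 := by
          have h1 : ((zcount v : Int)) ≤ 0 := hc0 ▸ hvle
          have h2 : (0:Int) ≤ ((zcount v : Int)) := by positivity
          exact_mod_cast le_antisymm h1 h2
        have hc0' : (List.foldl stepA (stepA (0, []) a) t).1 = 0 := by simpa using hc0
        simp [hc0', hz0]
      · have hcpos : 0 < ((a :: t).foldl stepA (0, [])).1 := lt_of_le_of_ne hc (Ne.symm hc0)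
        obtain ⟨hzv, hmax⟩ := hvpos hcpos
        have hzpos : 0 < zcount v := by
          have : (0:Int) < ((zcount v : Int)) := hzv ▸ hcpos
          exact_mod_cast this
        simp only [hc0, if_neg, not_false_iff, hmax, hzpos, if_pos]
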